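-- pv_equiv track=rewrite | github.com/GundalaNikhil/DSA | dsa-problems/Bitwise/test_all_hidden_testcases.py | bit_003_solution
-- ===== SOURCE A (Python) =====
-- def bit_003_solution(L, R, m):
--     """BIT-003: Bitwise AND Skip Multiples"""
--     result = None
--     for i in range(L, R + 1):
--         if i % m != 0:
--             if result is None:
--                 result = i
--             else:
--                 result &= i
--     return result if result is not None else -1
-- ===== SOURCE B (Python) =====
-- def bit_003_solution(L, R, m):
--     """BIT-003: Bitwise AND Skip Multiples -- block decomposition with closed-form range AND."""
--
--     def range_and(a, b):
--         # AND of all integers in [a, b] (a <= b): clear bits below the highest differing bit.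
--         if a < 0 <= b:
--             return 0
--         p = (a ^ b).bit_length()
--         return (a >> p) << p
--
--     k = abs(m)
--     res = None
--     start = L
--     M = -((-L) // k) * k  # smallest multiple of k that is >= L
--     while M <= R:
--         if start <= M - 1:
--             v = range_and(start, M - 1)
--             res = v if res is None else res & v
--         start = M + 1
--         M += k
--     if start <= R:
--         v = range_and(start, R)
--         res = v if res is None else res & v
--     return res if res is not None else -1
-- ===== Notes on version B (the rewrite author's own statement) =====
-- stated objective: faster
-- what changed: Instead of AND-ing every element of [L,R], B iterates only over the multiples of |m| and folds in a closed-form AND of each gap between them, computed as (a>>p)<<p with p = (a^b).bit_length().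
-- outside the precondition, e.g. on bit_003_solution(10, 8, 0): A returns -1, B raises ZeroDivisionError; on bit_003_solution(1, 10, 0): A raises ZeroDivisionError, B raises ZeroDivisionError
import Mathlib
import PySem

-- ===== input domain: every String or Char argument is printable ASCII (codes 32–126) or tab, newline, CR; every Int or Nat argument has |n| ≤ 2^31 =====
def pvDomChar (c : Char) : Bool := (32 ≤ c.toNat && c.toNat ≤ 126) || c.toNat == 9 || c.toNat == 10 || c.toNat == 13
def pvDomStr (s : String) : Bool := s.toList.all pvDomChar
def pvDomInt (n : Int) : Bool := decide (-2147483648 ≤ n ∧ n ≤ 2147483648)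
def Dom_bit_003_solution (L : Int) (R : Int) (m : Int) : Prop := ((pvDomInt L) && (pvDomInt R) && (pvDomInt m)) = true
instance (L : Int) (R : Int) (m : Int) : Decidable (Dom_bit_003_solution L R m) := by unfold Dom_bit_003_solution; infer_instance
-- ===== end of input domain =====

-- B replaces A's element-by-element scan with a block decomposition: it jumps from one
-- multiple of |m| to the next and folds in a closed-form AND of each gap (objective: faster).

-- ===== PORT A =====
def bit_003_solution (L : Int) (R : Int) (m : Int) : Int :=
  let result := (PySem.List.pyRange L (R+1) 1).foldl
    (fun (result : Option Int) i =>
      if PySem.Int.mod i m ≠ 0 then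
        match result with
        | none => some i
        | some r => some (PySem.Int.band r i)
      else result) none
  match result with
  | some r => r
  | none => -1

-- ===== PORT B =====
-- AND of all integers in [a, b] (a ≤ b): clear the bits below the highest differing bit
def pvRangeAnd (a b : Int) : Int :=
  if a < 0 ∧ 0 ≤ b then 0
  else
    let p := PySem.Int.bitLength (PySem.Int.bxor a b)
    (a >>> p) <<< p

-- res = v if res is None else res & v
def pvCombine (res : Option Int) (v : Int) : Int :=
  match res with
  | none => v
  | some r => PySem.Int.band r v

-- the while-loop of Source B over the multiples M of k (the `1 ≤ k` conjunct only makes the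
-- recursion total; under Pre_ it always holds)
def pvBlockLoop (k R M start : Int) (res : Option Int) : Int × Option Int :=
  if h : M ≤ R ∧ 1 ≤ k then
    let res' := if start ≤ M - 1 then some (pvCombine res (pvRangeAnd start (M-1))) else res
    pvBlockLoop k R (M+k) (M+1) res'
  else (start, res)
termination_by (R + 1 - M).toNat
decreasing_by omega

def bit_003_solution_alt (L : Int) (R : Int) (m : Int) : Int :=
  let k : Int := |m|
  let M0 : Int := -(PySem.Int.floordiv (-L) k) * k
  let sr := pvBlockLoop k R M0 L none
  let res := if sr.1 ≤ R then some (pvCombine sr.2 (pvRangeAnd sr.1 R)) else sr.2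
  match res with
  | some r => r
  | none => -1

-- ===== PRECONDITION & SPEC =====
-- Pre_ excludes m = 0: A raises ZeroDivisionError (i % 0) whenever L <= R, and on the empty
-- range (L > R, where A returns -1) B's first-multiple computation (-L) // 0 raises instead.
def Pre_bit_003_solution (L : Int) (R : Int) (m : Int) : Prop := m ≠ 0
instance (L : Int) (R : Int) (m : Int) : Decidable (Pre_bit_003_solution L R m) := by
  unfold Pre_bit_003_solution; infer_instance

def pvWitness_bit_003_solution : Int × Int × Int := (1, 10, 3)

def Spec_bit_003_solution (L : Int) (R : Int) (m : Int) (out : Int) : Prop := out = bit_003_solution_alt L R m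
instance (L : Int) (R : Int) (m : Int) (out : Int) : Decidable (Spec_bit_003_solution L R m out) := by unfold Spec_bit_003_solution; infer_instance

-- ===== CLAIM (what is proved, stated in full; the proofs are below) =====
def Claim_equal_bit_003_solution : Prop := ∀ (L : Int) (R : Int) (m : Int), Dom_bit_003_solution L R m → Pre_bit_003_solution L R m → Spec_bit_003_solution L R m (bit_003_solution L R m)

-- ===== LEMMAS AND PROOFS =====

def tb (x : Int) (n : Nat) : Bool := decide ((x / 2^n) % 2 = 1)

lemma ediv_eq_of {a b q r : Int} (hb : 0 < b) (h : r + b * q = a) (h0 : 0 ≤ r) (hr : r < b) :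
    a / b = q := ((Int.ediv_emod_unique hb).mpr ⟨h, h0, hr⟩).1

lemma natCast_ediv_pow (k : Nat) (n : Nat) : ((k : Int)) / 2^n = ((k / 2^n : Nat) : Int) := by
  apply ediv_eq_of (r := ((k % 2^n : Nat) : Int)) (by positivity)
  · push_cast
    have := Nat.div_add_mod k (2^n)
    push_cast at this
    linarith
  · positivity
  · exact_mod_cast Nat.mod_lt _ (by positivity)

lemma negSucc_ediv_pow (k : Nat) (n : Nat) : (Int.negSucc k) / 2^n = Int.negSucc (k / 2^n) := by
  apply ediv_eq_of (r := ((2^n : Int) - 1 - ((k % 2^n : Nat) : Int))) (by positivity)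
  · rw [Int.negSucc_eq, Int.negSucc_eq]
    have := Nat.div_add_mod k (2^n)
    have h2 : ((2:Int)^n) * ((k / 2^n : Nat) : Int) = ((2^n * (k / 2^n) : Nat) : Int) := by push_cast; ring
    push_cast
    push_cast at this
    linarith
  · have := Nat.mod_lt k (y := 2^n) (by positivity)
    have : ((k % 2^n : Nat) : Int) < 2^n := by exact_mod_cast this
    omega
  · have : (0:Int) ≤ ((k % 2^n : Nat) : Int) := by positivity
    omega

lemma shiftRight_eq (x : Int) (n : Nat) : x >>> n = x / 2^n := by
  cases x with
  | ofNat k =>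
      show Int.ofNat (k >>> n) = _
      simp only [Int.ofNat_eq_natCast]
      rw [Nat.shiftRight_eq_div_pow, natCast_ediv_pow]
  | negSucc k =>
      show Int.negSucc (k >>> n) = _
      rw [Nat.shiftRight_eq_div_pow, negSucc_ediv_pow]

lemma shiftLeft_eq (x : Int) (n : Nat) : x <<< n = x * 2^n := by
  cases x with
  | ofNat k =>
      show Int.ofNat (k <<< n) = _
      simp only [Int.ofNat_eq_natCast]
      rw [Nat.shiftLeft_eq]
      push_cast; ring
  | negSucc k =>
      show Int.negSucc ((k+1) <<< n - 1) = _
      rw [Nat.shiftLeft_eq]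
      have h1 : 1 ≤ (k+1) * 2^n := Nat.one_le_iff_ne_zero.mpr (by positivity)
      rw [Int.negSucc_eq, Int.negSucc_eq]
      push_cast [h1]
      ring

lemma tb_ofNat (k : Nat) (n : Nat) : tb (Int.ofNat k) n = k.testBit n := by
  rw [tb, Int.ofNat_eq_natCast, natCast_ediv_pow, Nat.testBit_eq_decide_div_mod_eq,
    decide_eq_decide]
  omega

lemma tb_negSucc (k : Nat) (n : Nat) : tb (Int.negSucc k) n = !(k.testBit n) := by
  rw [tb, negSucc_ediv_pow, Int.negSucc_eq, Nat.testBit_eq_decide_div_mod_eq,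
    ← decide_not, decide_eq_decide]
  omega

lemma tb_ext {x y : Int} (h : ∀ n, tb x n = tb y n) : x = y := by
  cases x with
  | ofNat a =>
    cases y with
    | ofNat b =>
        have : a = b := Nat.eq_of_testBit_eq fun i => by
          have := h i; rwa [tb_ofNat, tb_ofNat] at this
        rw [this]
    | negSucc b =>
        exfalso
        have hN := h (max (a+1) (b+1))
        rw [tb_ofNat, tb_negSucc] at hN
        rw [Nat.testBit_eq_false_of_lt, Nat.testBit_eq_false_of_lt] at hN
        · simp at hN
        · calc b < 2^b := Nat.lt_two_pow_self
               _ ≤ 2^(max (a+1) (b+1)) := Nat.pow_le_pow_right (by omega) (by omega)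
        · calc a < 2^a := Nat.lt_two_pow_self
               _ ≤ 2^(max (a+1) (b+1)) := Nat.pow_le_pow_right (by omega) (by omega)
  | negSucc a =>
    cases y with
    | negSucc b =>
        have : a = b := Nat.eq_of_testBit_eq fun i => by
          have := h i; rw [tb_negSucc, tb_negSucc] at this
          exact Bool.not_inj this
        rw [this]
    | ofNat b =>
        exfalso
        have hN := h (max (a+1) (b+1))
        rw [tb_negSucc, tb_ofNat] at hN
        rw [Nat.testBit_eq_false_of_lt, Nat.testBit_eq_false_of_lt] at hN
        · simp at hN
        · calc b < 2^b := Nat.lt_two_pow_self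
               _ ≤ 2^(max (a+1) (b+1)) := Nat.pow_le_pow_right (by omega) (by omega)
        · calc a < 2^a := Nat.lt_two_pow_self
               _ ≤ 2^(max (a+1) (b+1)) := Nat.pow_le_pow_right (by omega) (by omega)

lemma land_div_two (a m : Nat) : (a &&& m) / 2 = (a / 2) &&& (m / 2) := by
  apply Nat.eq_of_testBit_eq
  intro i
  rw [← Nat.testBit_succ, Nat.testBit_land, Nat.testBit_land, Nat.testBit_succ, Nat.testBit_succ]

lemma land_parity (a m : Nat) : ((a &&& m) % 2 = 1) ↔ (a % 2 = 1 ∧ m % 2 = 1) := by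
  have h0 := Nat.testBit_land a m 0
  simp only [Nat.testBit_zero] at h0
  rcases Nat.mod_two_eq_zero_or_one a with ha | ha <;>
    rcases Nat.mod_two_eq_zero_or_one m with hm | hm <;>
    simp [ha, hm] at h0 ⊢

lemma testBit_sub_land (a m i : Nat) : (a - (a &&& m)).testBit i = (a.testBit i && !(m.testBit i)) := by
  induction i generalizing a m with
  | zero =>
      have hle : (a &&& m) ≤ a := Nat.and_le_left
      have hc2 := land_parity a m
      simp only [Nat.testBit_zero, ← decide_not, ← Bool.decide_and, decide_eq_decide]
      omega
  | succ i IH =>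
      have hle : (a &&& m) ≤ a := Nat.and_le_left
      have hc2 := land_parity a m
      have hdiv : (a - (a &&& m)) / 2 = a / 2 - ((a / 2) &&& (m / 2)) := by
        rw [← land_div_two]
        omega
      rw [Nat.testBit_succ, hdiv, IH, ← Nat.testBit_succ, ← Nat.testBit_succ]

lemma neg_negSucc_sub_one (b : Nat) : (-(Int.negSucc b) - 1) = (b : Int) := by
  rw [Int.negSucc_eq]; ring

lemma tb_band (a b : Int) (n : Nat) : tb (PySem.Int.band a b) n = (tb a n && tb b n) := by
  rcases a with a | a <;> rcases b with b | b <;>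
    simp only [PySem.Int.band, Int.ofNat_eq_natCast]
  · rw [if_pos (by positivity), if_pos (by positivity)]
    have h : ((a : Int).toNat &&& (b : Int).toNat) = a &&& b := by simp
    rw [h, ← Int.ofNat_eq_natCast (a &&& b), tb_ofNat, ← Int.ofNat_eq_natCast a, tb_ofNat,
      ← Int.ofNat_eq_natCast b, tb_ofNat, Nat.testBit_land]
  · rw [if_pos (by positivity), if_neg (by simp [Int.negSucc_eq]; omega)]
    have h : ((a : Int).toNat - ((a : Int).toNat &&& (-(Int.negSucc b) - 1).toNat)) = a - (a &&& b) := by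
      rw [neg_negSucc_sub_one]; simp
    rw [h, ← Int.ofNat_eq_natCast (a - (a &&& b)), tb_ofNat, ← Int.ofNat_eq_natCast a, tb_ofNat,
      tb_negSucc, testBit_sub_land]
  · rw [if_neg (by simp [Int.negSucc_eq]; omega), if_pos (by positivity)]
    have h : ((b : Int).toNat - ((b : Int).toNat &&& (-(Int.negSucc a) - 1).toNat)) = b - (b &&& a) := by
      rw [neg_negSucc_sub_one]; simp
    rw [h, ← Int.ofNat_eq_natCast (b - (b &&& a)), tb_ofNat, tb_negSucc,
      ← Int.ofNat_eq_natCast b, tb_ofNat, testBit_sub_land, Bool.and_comm]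
  · rw [if_neg (by simp [Int.negSucc_eq]; omega), if_neg (by simp [Int.negSucc_eq]; omega)]
    have h1 : (-(Int.negSucc a) - 1).toNat = a := by rw [neg_negSucc_sub_one]; simp
    have h2 : (-(Int.negSucc b) - 1).toNat = b := by rw [neg_negSucc_sub_one]; simp
    have h : (-((( -(Int.negSucc a) - 1).toNat ||| (-(Int.negSucc b) - 1).toNat : Nat) : Int) - 1) = Int.negSucc (a ||| b) := by
      rw [h1, h2, Int.negSucc_eq]; ring
    rw [h, tb_negSucc, tb_negSucc, tb_negSucc, Nat.testBit_lor]
    cases a.testBit n <;> cases b.testBit n <;> rfl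

lemma tb_bxor (a b : Int) (n : Nat) : tb (PySem.Int.bxor a b) n = (tb a n ^^ tb b n) := by
  rcases a with a | a <;> rcases b with b | b <;>
    simp only [PySem.Int.bxor, Int.ofNat_eq_natCast]
  · rw [if_pos (by positivity), if_pos (by positivity)]
    have h : ((a : Int).toNat ^^^ (b : Int).toNat) = a ^^^ b := by simp
    rw [h, ← Int.ofNat_eq_natCast (a ^^^ b), tb_ofNat, ← Int.ofNat_eq_natCast a, tb_ofNat,
      ← Int.ofNat_eq_natCast b, tb_ofNat, Nat.testBit_xor]
  · rw [if_pos (by positivity), if_neg (by simp [Int.negSucc_eq]; omega)]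
    have h : (-((((a : Int).toNat ^^^ (-(Int.negSucc b) - 1).toNat : Nat)) : Int) - 1) = Int.negSucc (a ^^^ b) := by
      rw [neg_negSucc_sub_one]
      simp only [Int.toNat_natCast, Int.negSucc_eq]
      ring
    rw [h, tb_negSucc, ← Int.ofNat_eq_natCast a, tb_ofNat, tb_negSucc, Nat.testBit_xor]
    cases a.testBit n <;> cases b.testBit n <;> rfl
  · rw [if_neg (by simp [Int.negSucc_eq]; omega), if_pos (by positivity)]
    have h : (-((((-(Int.negSucc a) - 1).toNat ^^^ (b : Int).toNat : Nat)) : Int) - 1) = Int.negSucc (a ^^^ b) := by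
      rw [neg_negSucc_sub_one]
      simp only [Int.toNat_natCast, Int.negSucc_eq]
      ring
    rw [h, tb_negSucc, tb_negSucc, ← Int.ofNat_eq_natCast b, tb_ofNat, Nat.testBit_xor]
    cases a.testBit n <;> cases b.testBit n <;> rfl
  · rw [if_neg (by simp [Int.negSucc_eq]; omega), if_neg (by simp [Int.negSucc_eq]; omega)]
    have h : ((((-(Int.negSucc a) - 1).toNat ^^^ (-(Int.negSucc b) - 1).toNat : Nat) : Int)) = Int.ofNat (a ^^^ b) := by
      rw [neg_negSucc_sub_one, neg_negSucc_sub_one]; simp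
    rw [h, tb_ofNat, tb_negSucc, tb_negSucc, Nat.testBit_xor]
    cases a.testBit n <;> cases b.testBit n <;> rfl

lemma band_assoc (a b c : Int) :
    PySem.Int.band (PySem.Int.band a b) c = PySem.Int.band a (PySem.Int.band b c) := by
  apply tb_ext
  intro n
  simp only [tb_band, Bool.and_assoc]

lemma tb_foldl_band (l : List Int) (a : Int) (n : Nat) :
    tb (l.foldl PySem.Int.band a) n = (tb a n && l.all (fun i => tb i n)) := by
  induction l generalizing a with
  | nil => simp
  | cons x xs IH => simp [List.foldl_cons, IH, tb_band, Bool.and_assoc]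

lemma tb_shiftRight (x : Int) (k n : Nat) : tb (x >>> k) n = tb x (n + k) := by
  rw [tb, tb, shiftRight_eq]
  have h : x / 2^k / 2^n = x / 2^(n+k) := by
    rw [Int.ediv_ediv_of_nonneg (by positivity), ← pow_add, Nat.add_comm k n]
  rw [h]

lemma tb_mul_pow_lt (y : Int) {k n : Nat} (h : n < k) : tb (y * 2^k) n = false := by
  rw [tb]
  have hk : (2:Int)^k = 2^n * 2^(k - n) := by rw [← pow_add]; congr 1; omega
  have h1 : y * 2^k / 2^n = y * 2^(k-n) := by
    rw [hk, ← mul_assoc, mul_comm y ((2:Int)^n), mul_assoc, Int.mul_ediv_cancel_left _ (by positivity)]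
  rw [h1]
  have h2 : y * 2^(k-n) % 2 = 0 := by
    have : (2:Int) ∣ y * 2^(k-n) := Dvd.dvd.mul_left (dvd_pow_self 2 (by omega)) y
    omega
  simp [h2]

lemma tb_mul_pow_ge (y : Int) {k n : Nat} (h : k ≤ n) : tb (y * 2^k) n = tb y (n - k) := by
  rw [tb, tb]
  have hk : (2:Int)^n = 2^k * 2^(n - k) := by rw [← pow_add]; congr 1; omega
  have h1 : y * 2^k / 2^n = y / 2^(n-k) := by
    rw [hk, mul_comm ((2:Int)^k) _]
    exact Int.mul_ediv_mul_of_pos_left y _ (by positivity)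
  rw [h1]

lemma tb_shiftLeft (x : Int) (k n : Nat) :
    tb (x <<< k) n = if n < k then false else tb x (n - k) := by
  rw [shiftLeft_eq]
  by_cases h : n < k
  · rw [if_pos h, tb_mul_pow_lt _ h]
  · rw [if_neg h, tb_mul_pow_ge _ (by omega)]

lemma tb_natAbs {x : Int} (hx : 0 ≤ x) (n : Nat) : tb x n = x.natAbs.testBit n := by
  rcases x with a | a
  · rw [tb_ofNat]; rfl
  · exfalso; simp [Int.negSucc_eq] at hx; omega

lemma tb_high {x : Int} (hx : 0 ≤ x) {n : Nat} (hn : PySem.Int.bitLength x ≤ n) : tb x n = false := by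
  rw [tb_natAbs hx]
  apply Nat.testBit_eq_false_of_lt
  calc x.natAbs < 2^PySem.Int.bitLength x := PySem.Int.lt_two_pow_bitLength x
    _ ≤ 2^n := Nat.pow_le_pow_right (by omega) hn

lemma tb_top {x : Int} (hx : 0 < x) : tb x (PySem.Int.bitLength x - 1) = true := by
  rw [tb_natAbs (le_of_lt hx)]
  have h1 := PySem.Int.lt_two_pow_bitLength x
  have h2 := PySem.Int.two_pow_bitLength_le x (by omega)
  set p := PySem.Int.bitLength x with hp
  have hp1 : 1 ≤ p := by
    by_contra hc
    have h0 : p = 0 := by omega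
    rw [h0] at h1
    simp at h1
    omega
  have hdiv : x.natAbs / 2^(p-1) = 1 := by
    apply Nat.div_eq_of_lt_le (by omega)
    have : (1+1) * 2^(p-1) = 2^p := by rw [← pow_succ']; congr 1; omega
    omega
  rw [Nat.testBit_eq_decide_div_mod_eq, hdiv]
  rfl

lemma bxor_nonneg {a b : Int} (h : 0 ≤ a ↔ 0 ≤ b) : 0 ≤ PySem.Int.bxor a b := by
  rcases a with a | a <;> rcases b with b | b <;> simp only [PySem.Int.bxor, Int.ofNat_eq_natCast]
  · rw [if_pos (by positivity), if_pos (by positivity)]; positivity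
  · exfalso; have := h.mp (by rw [Int.ofNat_eq_natCast]; positivity); simp [Int.negSucc_eq] at this; omega
  · exfalso; have := h.mpr (by rw [Int.ofNat_eq_natCast]; positivity); simp [Int.negSucc_eq] at this; omega
  · rw [if_neg (by simp [Int.negSucc_eq]; omega), if_neg (by simp [Int.negSucc_eq]; omega)]
    positivity

lemma shift_eq_of_bxor_high {a b : Int} (hx : 0 ≤ PySem.Int.bxor a b) (p : Nat)
    (hp : PySem.Int.bitLength (PySem.Int.bxor a b) ≤ p) : a >>> p = b >>> p := by
  apply tb_ext
  intro n
  rw [tb_shiftRight, tb_shiftRight]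
  have h := tb_high hx (n := n + p) (by omega)
  rw [tb_bxor] at h
  cases h1 : tb a (n + p) <;> cases h2 : tb b (n + p) <;> rw [h1, h2] at h <;> simp_all

lemma shift_eq_of_between {a b c : Int} (p : Nat) (h1 : a ≤ c) (h2 : c ≤ b)
    (h : a >>> p = b >>> p) : c >>> p = a >>> p := by
  rw [shiftRight_eq, shiftRight_eq] at h
  rw [shiftRight_eq, shiftRight_eq]
  have hh1 := Int.ediv_le_ediv (c := (2:Int)^p) (by positivity) h1
  have hh2 := Int.ediv_le_ediv (c := (2:Int)^p) (by positivity) h2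
  omega

lemma tb_between {a b c : Int} {p n : Nat} (hpn : p ≤ n) (h1 : a ≤ c) (h2 : c ≤ b)
    (h : a >>> p = b >>> p) : tb c n = tb a n := by
  have hc := shift_eq_of_between p h1 h2 h
  have e1 : tb (c >>> p) (n - p) = tb c n := by rw [tb_shiftRight]; congr 1; omega
  have e2 : tb (a >>> p) (n - p) = tb a n := by rw [tb_shiftRight]; congr 1; omega
  rw [← e1, ← e2, hc]

lemma rangeAnd_spec {a b : Int} (hmix : ¬(a < 0 ∧ 0 ≤ b)) (hab : a ≤ b) :
    (PySem.List.pyRange (a+1) (b+1) 1).foldl PySem.Int.band a = pvRangeAnd a b := by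
  have hsign : 0 ≤ a ↔ 0 ≤ b := by omega
  have hx0 : 0 ≤ PySem.Int.bxor a b := bxor_nonneg hsign
  rw [pvRangeAnd, if_neg hmix]
  set p := PySem.Int.bitLength (PySem.Int.bxor a b) with hp
  apply tb_ext
  intro n
  rw [tb_foldl_band, tb_shiftLeft]
  by_cases hnp : n < p
  · rw [if_pos hnp]
    have hab' : a < b := by
      rcases lt_or_eq_of_le hab with h | h
      · exact h
      · exfalso
        rw [h] at hp
        rw [PySem.Int.bxor_self, PySem.Int.bitLength_zero] at hp
        omega
    by_cases ha : tb a n = true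
    · by_cases hb : tb b n = true
      · -- both endpoints have the bit: a boundary multiple of 2^(n+1) lies inside
        set q : Int := a >>> (n+1) with hq
        set c : Int := (q + 1) * 2^(n+1) with hc
        have hrw : a / 2^(n+1) = q := by rw [hq, shiftRight_eq]
        have hc1 : a < c := by
          have := Int.lt_ediv_add_one_mul_self a (b := (2:Int)^(n+1)) (by positivity)
          rw [hrw] at this
          exact this
        have hc2 : c ≤ b := by
          by_contra hcb
          rw [not_le] at hcb
          have hqb : b >>> (n+1) = q := by
            rw [shiftRight_eq]
            have le1 : q ≤ b / 2^(n+1) := by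
              rw [← hrw]
              exact Int.ediv_le_ediv (by positivity) hab
            have lt1 : b / 2^(n+1) < q + 1 :=
              (Int.ediv_lt_iff_lt_mul (by positivity)).mpr (by omega)
            omega
          have hxj : ∀ j, n ≤ j → tb (PySem.Int.bxor a b) j = false := by
            intro j hj
            rw [tb_bxor]
            rcases Nat.eq_or_lt_of_le hj with he | hlt
            · rw [← he, ha, hb]; rfl
            · have hj1 : (j - (n+1)) + (n+1) = j := by omega
              have e1 : tb a j = tb (a >>> (n+1)) (j - (n+1)) := by
                rw [tb_shiftRight, hj1]
              have e2 : tb b j = tb (b >>> (n+1)) (j - (n+1)) := by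
                rw [tb_shiftRight, hj1]
              rw [e1, e2, hqb, ← hq, Bool.xor_self]
          have hple : p ≤ n := by
            by_cases h0 : PySem.Int.bxor a b = 0
            · rw [hp, h0, PySem.Int.bitLength_zero]; omega
            · by_contra hgt
              have htop := tb_top (x := PySem.Int.bxor a b) (by omega)
              rw [← hp] at htop
              have := hxj (p - 1) (by omega)
              rw [this] at htop
              exact Bool.false_ne_true htop
          omega
        have hcmem : c ∈ PySem.List.pyRange (a+1) (b+1) 1 :=
          PySem.List.mem_pyRange_one.mpr (by omega)
        have hcf : tb c n = false := tb_mul_pow_lt _ (by omega)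
        have : (PySem.List.pyRange (a+1) (b+1) 1).all (fun i => tb i n) = false :=
          List.all_eq_false.mpr ⟨c, hcmem, by rw [hcf]; simp⟩
        rw [this, Bool.and_false]
      · have hbmem : b ∈ PySem.List.pyRange (a+1) (b+1) 1 :=
          PySem.List.mem_pyRange_one.mpr (by omega)
        have : (PySem.List.pyRange (a+1) (b+1) 1).all (fun i => tb i n) = false :=
          List.all_eq_false.mpr ⟨b, hbmem, by simpa using hb⟩
        rw [this, Bool.and_false]
    · rw [Bool.not_eq_true] at ha
      rw [ha, Bool.false_and]
  · rw [if_neg hnp]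
    have hpn : p ≤ n := by omega
    have e2 : tb (a >>> p) (n - p) = tb a n := by rw [tb_shiftRight]; congr 1; omega
    rw [e2]
    have hsh : a >>> p = b >>> p := shift_eq_of_bxor_high hx0 p le_rfl
    by_cases ha : tb a n = true
    · have : (PySem.List.pyRange (a+1) (b+1) 1).all (fun i => tb i n) = true := by
        rw [List.all_eq_true]
        intro i hi
        have := PySem.List.mem_pyRange_one.mp hi
        rw [tb_between hpn (by omega) (by omega) hsh]
        exact ha
      rw [this, ha, Bool.true_and]
    · rw [Bool.not_eq_true] at ha
      rw [ha, Bool.false_and]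

def stp (res : Option Int) (i : Int) : Option Int := some (pvCombine res i)


lemma foldl_stp_some (l : List Int) (r : Int) :
    l.foldl stp (some r) = some (l.foldl PySem.Int.band r) := by
  induction l generalizing r with
  | nil => rfl
  | cons x xs IH => exact IH (PySem.Int.band r x)

lemma foldl_band_pull (l : List Int) (r a : Int) :
    l.foldl PySem.Int.band (PySem.Int.band r a) = PySem.Int.band r (l.foldl PySem.Int.band a) := by
  induction l generalizing a with
  | nil => rfl
  | cons x xs IH => rw [List.foldl_cons, List.foldl_cons, band_assoc, IH]

lemma foldl_stp_range {a b : Int} (res : Option Int) (hmix : ¬(a < 0 ∧ 0 ≤ b)) (hab : a ≤ b) :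
    (PySem.List.pyRange a (b+1) 1).foldl stp res = some (pvCombine res (pvRangeAnd a b)) := by
  rw [PySem.List.pyRange_one_cons (by omega), List.foldl_cons]
  have hstep : stp res a = some (pvCombine res a) := rfl
  rw [hstep, foldl_stp_some]
  cases res with
  | none =>
      show some ((PySem.List.pyRange (a+1) (b+1) 1).foldl PySem.Int.band a) = _
      rw [rangeAnd_spec hmix hab]
      rfl
  | some r =>
      show some ((PySem.List.pyRange (a+1) (b+1) 1).foldl PySem.Int.band (PySem.Int.band r a)) = _
      rw [foldl_band_pull, rangeAnd_spec hmix hab]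
      rfl

lemma loop_spec (k R : Int) (hk : 1 ≤ k) :
    ∀ (n : Nat) (M start : Int) (res : Option Int), (R + 1 - M).toNat = n →
      k ∣ M → start ≤ M → (∀ i, start ≤ i → i < M → ¬ (k ∣ i)) →
      (if (pvBlockLoop k R M start res).1 ≤ R then
          some (pvCombine (pvBlockLoop k R M start res).2 (pvRangeAnd (pvBlockLoop k R M start res).1 R))
        else (pvBlockLoop k R M start res).2)
      = ((PySem.List.pyRange start (R+1) 1).filter (fun i => decide (¬ (k ∣ i)))).foldl stp res := by
  intro n
  induction n using Nat.strong_induction_on with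
  | _ n IH =>
    intro M start res hn hdvd hle hnm
    by_cases hMR : M ≤ R
    · rw [pvBlockLoop, dif_pos (⟨hMR, hk⟩ : M ≤ R ∧ 1 ≤ k)]
      have hsplit := PySem.List.pyRange_one_append start (M+1) (R+1) (by omega) (by omega)
      rw [hsplit, List.filter_append, List.foldl_append]
      have h1 : (PySem.List.pyRange start (M+1) 1).filter (fun i => decide (¬ (k ∣ i)))
          = PySem.List.pyRange start M 1 := by
        rw [PySem.List.pyRange_one_succ_right hle, List.filter_append]
        have hM : (fun i => decide (¬ (k ∣ i))) M = false := by
          simp only [decide_eq_false_iff_not, Decidable.not_not]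
          exact hdvd
        have h2 : [M].filter (fun i => decide (¬ (k ∣ i))) = [] := by
          simp [List.filter, hM]
        have h3 : (PySem.List.pyRange start M 1).filter (fun i => decide (¬ (k ∣ i)))
            = PySem.List.pyRange start M 1 := by
          apply List.filter_eq_self.mpr
          intro x hx
          have := PySem.List.mem_pyRange_one.mp hx
          exact decide_eq_true (hnm x (by omega) (by omega))
        rw [h2, h3, List.append_nil]
      rw [h1]
      have h4 : (PySem.List.pyRange start M 1).foldl stp res
          = (if start ≤ M - 1 then some (pvCombine res (pvRangeAnd start (M-1))) else res) := by
        by_cases hsM : start ≤ M - 1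
        · rw [if_pos hsM]
          have hmix : ¬(start < 0 ∧ 0 ≤ M - 1) := by
            intro hc
            exact hnm 0 (by omega) (by omega) (dvd_zero k)
          have hMe : M = (M - 1) + 1 := by omega
          conv_lhs => rw [hMe]
          exact foldl_stp_range res hmix hsM
        · rw [if_neg hsM]
          rw [PySem.List.pyRange_one_eq_nil (by omega)]
          rfl
      rw [h4]
      apply IH ((R + 1 - (M + k)).toNat) (by omega) (M + k) (M + 1) _ rfl
        (dvd_add hdvd dvd_rfl) (by omega)
      intro i hi1 hi2 hdv
      obtain ⟨s, hs⟩ := hdvd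
      obtain ⟨t, ht⟩ := hdv
      have hst1 : s < t := by
        have : k * s < k * t := by omega
        exact lt_of_mul_lt_mul_left this (by omega)
      have hst2 : t < s + 1 := by
        have : k * t < k * (s + 1) := by
          have : k * (s + 1) = k * s + k := by ring
          omega
        exact lt_of_mul_lt_mul_left this (by omega)
      omega
    · rw [pvBlockLoop, dif_neg (fun h => hMR h.1)]
      have hfull : (PySem.List.pyRange start (R+1) 1).filter (fun i => decide (¬ (k ∣ i)))
          = PySem.List.pyRange start (R+1) 1 := by
        apply List.filter_eq_self.mpr
        intro x hx
        have := PySem.List.mem_pyRange_one.mp hx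
        exact decide_eq_true (hnm x (by omega) (by omega))
      rw [hfull]
      by_cases hsR : start ≤ R
      · rw [if_pos hsR]
        have hmix : ¬(start < 0 ∧ 0 ≤ R) := by
          intro hc
          exact hnm 0 (by omega) (by omega) (dvd_zero k)
        exact (foldl_stp_range res hmix hsR).symm
      · rw [if_neg hsR]
        rw [PySem.List.pyRange_one_eq_nil (by omega)]
        rfl

lemma ports_agree (L R m : Int) (hm : m ≠ 0) : bit_003_solution L R m = bit_003_solution_alt L R m := by
  have hk : 1 ≤ |m| := Int.one_le_abs (by omega)
  unfold bit_003_solution bit_003_solution_alt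
  have hfun : (fun (result : Option Int) i =>
      if PySem.Int.mod i m ≠ 0 then
        match result with
        | none => some i
        | some r => some (PySem.Int.band r i)
      else result)
      = (fun (res : Option Int) i => if PySem.Int.mod i m ≠ 0 then stp res i else res) := by
    funext res i
    cases res <;> rfl
  rw [hfun, PySem.List.foldl_ite_eq_foldl_filter (fun i => PySem.Int.mod i m ≠ 0) stp]
  have hcong : (PySem.List.pyRange L (R+1) 1).filter (fun i => decide (PySem.Int.mod i m ≠ 0))
      = (PySem.List.pyRange L (R+1) 1).filter (fun i => decide (¬ (|m| ∣ i))) := by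
    apply List.filter_congr
    intro x _
    apply decide_eq_decide.mpr
    rw [not_iff_not, PySem.Int.mod_eq_zero_iff_dvd, abs_dvd]
  rw [hcong]
  -- M0 facts
  set q : Int := -(PySem.Int.floordiv (-L) |m|) with hqdef
  have hq : (q - 1) * |m| < L ∧ L ≤ q * |m| :=
    (PySem.Int.neg_floordiv_neg_eq_iff_of_pos (a := L) (b := |m|) (by omega)).mp rfl
  have hnm : ∀ i, L ≤ i → i < q * |m| → ¬ (|m| ∣ i) := by
    intro i h1 h2 hdv
    obtain ⟨t, ht⟩ := hdv
    have hcm : |m| * t = t * |m| := by ring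
    have hst1 : q - 1 < t := by
      have h3 : (q - 1) * |m| < t * |m| := by omega
      exact lt_of_mul_lt_mul_right h3 (by omega)
    have hst2 : t < q := by
      have h3 : |m| * t < |m| * q := by
        have e1 : |m| * t = t * |m| := by ring
        have e2 : |m| * q = q * |m| := by ring
        omega
      exact lt_of_mul_lt_mul_left h3 (by omega)
    omega
  have := loop_spec |m| R hk (R + 1 - q * |m|).toNat (q * |m|) L none rfl
    (dvd_mul_left _ _) (by omega) hnm
  rw [← this]

-- ===== VERDICT (by name: the statement is the Claim_ definition above) =====
theorem bit_003_solution_spec : Claim_equal_bit_003_solution := by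
  intro L R m _ hPre
  unfold Spec_bit_003_solution
  exact ports_agree L R m hPre
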